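-- pv_equiv track=rewrite | github.com/az-scout/az-scout-plugin-bdd-sku | src/az_scout_bdd_sku/plugin_config.py | _build_toml_content
-- ===== SOURCE A (Python) =====
-- def _build_toml_content(url: str, existing_lines: list[str]) -> str:
--     """Return TOML content with the ``[api]`` section set to *url*."""
--     new_lines: list[str] = []
--     in_api_section = False
--     api_written = False
--     for line in existing_lines:
--         stripped = line.strip()
--         if stripped == "[api]":
--             in_api_section = True
--             new_lines.append("[api]")
--             new_lines.append(f'base_url = "{url}"')
--             api_written = True
--             continue
--         if in_api_section:
--             if stripped.startswith("[") and stripped != "[api]":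
--                 in_api_section = False
--                 new_lines.append(line)
--             continue
--         new_lines.append(line)
--
--     if not api_written:
--         if new_lines and new_lines[-1].strip():
--             new_lines.append("")
--         new_lines.append("[api]")
--         new_lines.append(f'base_url = "{url}"')
--
--     return "\n".join(new_lines) + "\n"
-- ===== SOURCE B (Python) =====
-- def _build_toml_content(url: str, existing_lines: list[str]) -> str:
--     """Return TOML content with the ``[api]`` section set to *url*.
--
--     Block-based rewrite: split the lines into a preamble plus one block per
--     section header, replace every ``[api]`` block, keep the rest verbatim.
--     """
--     def is_header(line: str) -> bool:
--         return line.strip().startswith("[")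
--
--     api_lines = ["[api]", f'base_url = "{url}"']
--     n = len(existing_lines)
--     i = 0
--     while i < n and not is_header(existing_lines[i]):
--         i += 1
--     result = list(existing_lines[:i])
--     api_seen = False
--     while i < n:
--         j = i + 1
--         while j < n and not is_header(existing_lines[j]):
--             j += 1
--         if existing_lines[i].strip() == "[api]":
--             api_seen = True
--             result.extend(api_lines)
--         else:
--             result.extend(existing_lines[i:j])
--         i = j
--     if not api_seen:
--         if result and result[-1].strip():
--             result.append("")
--         result.extend(api_lines)
--     return "\n".join(result) + "\n"
-- ===== Notes on version B (the rewrite author's own statement) =====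
-- stated objective: alternative
-- what changed: Replaces A's single-pass state machine (in_api_section/api_written flags) with a block decomposition: split the lines into a preamble plus one block per section header, replace every [api] block by the two api lines and keep other blocks verbatim, then apply the same trailing-append rule.
import Mathlib
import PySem

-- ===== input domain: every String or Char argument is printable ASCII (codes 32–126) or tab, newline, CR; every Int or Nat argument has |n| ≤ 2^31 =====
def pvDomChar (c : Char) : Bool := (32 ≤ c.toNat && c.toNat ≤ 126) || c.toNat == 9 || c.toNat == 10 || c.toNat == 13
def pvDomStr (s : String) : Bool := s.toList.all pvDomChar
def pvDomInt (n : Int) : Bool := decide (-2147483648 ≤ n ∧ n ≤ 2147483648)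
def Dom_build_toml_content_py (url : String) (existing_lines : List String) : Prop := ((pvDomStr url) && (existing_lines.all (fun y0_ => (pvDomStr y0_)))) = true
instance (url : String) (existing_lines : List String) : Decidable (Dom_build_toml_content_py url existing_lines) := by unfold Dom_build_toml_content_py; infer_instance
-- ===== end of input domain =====

-- B rewrites A's single-pass state machine as a block decomposition (preamble + one block per
-- section header, [api] blocks replaced, others kept verbatim); objective: alternative structure.

-- ===== PORT A =====
-- the body of A's for-loop, on state (new_lines, in_api_section, api_written)
def pvStepA (url : String) (st : List String × Bool × Bool) (line : String) : List String × Bool × Bool :=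
  let new_lines := st.1
  let in_api_section := st.2.1
  let api_written := st.2.2
  let stripped := PySem.Str.strip line
  if stripped = "[api]" then
    (new_lines ++ ["[api]", "base_url = \"" ++ url ++ "\""], true, true)
  else if in_api_section then
    if PySem.Str.startswith stripped "[" && !(stripped == "[api]") then
      (new_lines ++ [line], false, api_written)
    else (new_lines, in_api_section, api_written)
  else (new_lines ++ [line], in_api_section, api_written)

def build_toml_content_py (url : String) (existing_lines : List String) : String :=
  let st := existing_lines.foldl (pvStepA url) ([], false, false)
  let new_lines := st.1
  let api_written := st.2.2
  let new_lines :=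
    if api_written then new_lines
    else
      -- `new_lines and new_lines[-1].strip()` : list nonempty and last line strips nonblank
      let new_lines :=
        if (new_lines.getLast?.map PySem.Str.strip).getD "" ≠ "" then new_lines ++ [""]
        else new_lines
      new_lines ++ ["[api]", "base_url = \"" ++ url ++ "\""]
  PySem.Str.join "\n" new_lines ++ "\n"

-- ===== PORT B =====
def pvIsHeader (line : String) : Bool := PySem.Str.startswith (PySem.Str.strip line) "["

-- one block per header line (`existing_lines[i:j]` scans rendered as takeWhile/dropWhile);
-- returns (rewritten lines of all blocks, api_seen)
def pvBlocks (url : String) : List String → List String × Bool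
  | [] => ([], false)
  | h :: t =>
    let body := t.takeWhile (fun l => !pvIsHeader l)
    let rest := t.dropWhile (fun l => !pvIsHeader l)
    let r := pvBlocks url rest
    if PySem.Str.strip h = "[api]" then
      (["[api]", "base_url = \"" ++ url ++ "\""] ++ r.1, true)
    else ((h :: body) ++ r.1, r.2)
termination_by l => l.length
decreasing_by exact Nat.lt_succ_of_le (List.length_dropWhile_le ..)

def build_toml_content_py_alt (url : String) (existing_lines : List String) : String :=
  let preamble := existing_lines.takeWhile (fun l => !pvIsHeader l)
  let rest := existing_lines.dropWhile (fun l => !pvIsHeader l)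
  let r := pvBlocks url rest
  let result := preamble ++ r.1
  let api_seen := r.2
  let result :=
    if api_seen then result
    else
      let result :=
        if (result.getLast?.map PySem.Str.strip).getD "" ≠ "" then result ++ [""]
        else result
      result ++ ["[api]", "base_url = \"" ++ url ++ "\""]
  PySem.Str.join "\n" result ++ "\n"

-- ===== PRECONDITION & SPEC =====
def Spec_build_toml_content_py (url : String) (existing_lines : List String) (out : String) : Prop := out = build_toml_content_py_alt url existing_lines
instance (url : String) (existing_lines : List String) (out : String) : Decidable (Spec_build_toml_content_py url existing_lines out) := by unfold Spec_build_toml_content_py; infer_instance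

-- ===== CLAIM (what is proved, stated in full; the proofs are below) =====
def Claim_equal_build_toml_content_py : Prop := ∀ (url : String) (existing_lines : List String), Dom_build_toml_content_py url existing_lines → Spec_build_toml_content_py url existing_lines (build_toml_content_py url existing_lines)

-- ===== LEMMAS AND PROOFS =====

-- recursive rendering of A's loop: (emitted lines, final in_api, api written during loop)
def pvGA (url : String) : Bool → List String → List String × Bool × Bool
  | in_api, [] => ([], in_api, false)
  | in_api, l :: ls =>
    let stripped := PySem.Str.strip l
    if stripped = "[api]" then
      let r := pvGA url true ls
      (["[api]", "base_url = \"" ++ url ++ "\""] ++ r.1, r.2.1, true)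
    else if in_api then
      if PySem.Str.startswith stripped "[" && !(stripped == "[api]") then
        let r := pvGA url false ls
        (l :: r.1, r.2.1, r.2.2)
      else pvGA url true ls
    else
      let r := pvGA url false ls
      (l :: r.1, r.2.1, r.2.2)

theorem pvGA_api {l : String} (url : String) (b : Bool) (ls : List String)
    (h1 : PySem.Str.strip l = "[api]") :
    pvGA url b (l :: ls) =
      ("[api]" :: ("base_url = \"" ++ url ++ "\"") :: (pvGA url true ls).1, (pvGA url true ls).2.1, true) := by
  simp [pvGA, h1]

theorem pvGA_hdr {l : String} (url : String) (ls : List String)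
    (h1 : ¬ PySem.Str.strip l = "[api]") (hh : PySem.Str.startswith (PySem.Str.strip l) "[" = true) :
    pvGA url true (l :: ls) = (l :: (pvGA url false ls).1, (pvGA url false ls).2.1, (pvGA url false ls).2.2) := by
  have hc : PySem.Chars.startswith (PySem.Chars.strip l.toList) ['['] = true := by simpa using hh
  simp [pvGA, h1, hc]

theorem pvGA_skip {l : String} (url : String) (ls : List String)
    (hh : PySem.Str.startswith (PySem.Str.strip l) "[" = false) :
    pvGA url true (l :: ls) = pvGA url true ls := by
  have h1 : ¬ PySem.Str.strip l = "[api]" := by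
    intro h; rw [h] at hh; exact absurd hh (by decide)
  have hc : PySem.Chars.startswith (PySem.Chars.strip l.toList) ['['] = false := by simpa using hh
  simp [pvGA, h1, hc]

theorem pvGA_plain {l : String} (url : String) (ls : List String)
    (h1 : ¬ PySem.Str.strip l = "[api]") :
    pvGA url false (l :: ls) = (l :: (pvGA url false ls).1, (pvGA url false ls).2.1, (pvGA url false ls).2.2) := by
  simp [pvGA, h1]

theorem pvStepA_eval (url : String) (st : List String × Bool × Bool) (line : String) :
    pvStepA url st line =
      if PySem.Str.strip line = "[api]" then
        (st.1 ++ ["[api]", "base_url = \"" ++ url ++ "\""], true, true)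
      else if st.2.1 then
        if PySem.Str.startswith (PySem.Str.strip line) "[" && !(PySem.Str.strip line == "[api]") then
          (st.1 ++ [line], false, st.2.2)
        else st
      else (st.1 ++ [line], st.2.1, st.2.2) := by
  simp only [pvStepA]

theorem pvFoldl_eq_gA (url : String) (ls : List String) :
    ∀ (acc : List String) (in_api aw : Bool),
    ls.foldl (pvStepA url) (acc, in_api, aw)
    = (acc ++ (pvGA url in_api ls).1, (pvGA url in_api ls).2.1, aw || (pvGA url in_api ls).2.2) := by
  induction ls with
  | nil => intro acc in_api aw; simp [pvGA]
  | cons l t ih =>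
    intro acc in_api aw
    rw [List.foldl_cons, pvStepA_eval]
    by_cases h1 : PySem.Str.strip l = "[api]"
    · rw [if_pos h1, ih, pvGA_api url in_api t h1]
      simp
    · rw [if_neg h1]
      cases in_api with
      | false =>
        simp only [Bool.false_eq_true, if_false]
        rw [ih, pvGA_plain url t h1]
        simp
      | true =>
        simp only [if_true]
        by_cases hh : PySem.Str.startswith (PySem.Str.strip l) "[" = true
        · have hc : PySem.Chars.startswith (PySem.Chars.strip l.toList) ['['] = true := by
            simp at hh; exact hh
          have hg : (PySem.Str.startswith (PySem.Str.strip l) "[" && !(PySem.Str.strip l == "[api]")) = true := by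
            simp [h1]
            exact hc
          rw [if_pos hg, ih, pvGA_hdr url t h1 hh]
          simp
        · have hh' : PySem.Str.startswith (PySem.Str.strip l) "[" = false := by
            simpa using hh
          have hc : PySem.Chars.startswith (PySem.Chars.strip l.toList) ['['] = false := by simpa using hh'
          have hg : (PySem.Str.startswith (PySem.Str.strip l) "[" && !(PySem.Str.strip l == "[api]")) = false := by
            simp [hc]
          rw [if_neg (by simp [hc]), ih, pvGA_skip url t hh']

theorem pvApi_isHeader {l : String} (h : PySem.Str.strip l = "[api]") : pvIsHeader l = true := by
  simp [pvIsHeader, h]; decide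

theorem pvBlocks_nil (url : String) : pvBlocks url [] = ([], false) := by
  simp [pvBlocks]

theorem pvBlocks_api {h : String} (url : String) (t : List String)
    (h1 : PySem.Str.strip h = "[api]") :
    pvBlocks url (h :: t) =
      ("[api]" :: ("base_url = \"" ++ url ++ "\"") :: (pvBlocks url (t.dropWhile (fun l => !pvIsHeader l))).1, true) := by
  rw [pvBlocks]
  simp [h1]

theorem pvBlocks_other {h : String} (url : String) (t : List String)
    (h1 : ¬ PySem.Str.strip h = "[api]") :
    pvBlocks url (h :: t) =
      ((h :: t.takeWhile (fun l => !pvIsHeader l)) ++ (pvBlocks url (t.dropWhile (fun l => !pvIsHeader l))).1,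
        (pvBlocks url (t.dropWhile (fun l => !pvIsHeader l))).2) := by
  rw [pvBlocks]
  simp [h1]

theorem pvGA_eq_blocks (url : String) (ls : List String) :
    (pvGA url false ls).1
      = ls.takeWhile (fun l => !pvIsHeader l) ++ (pvBlocks url (ls.dropWhile (fun l => !pvIsHeader l))).1
    ∧ (pvGA url false ls).2.2 = (pvBlocks url (ls.dropWhile (fun l => !pvIsHeader l))).2
    ∧ (pvGA url true ls).1 = (pvBlocks url (ls.dropWhile (fun l => !pvIsHeader l))).1
    ∧ (pvGA url true ls).2.2 = (pvBlocks url (ls.dropWhile (fun l => !pvIsHeader l))).2 := by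
  induction ls with
  | nil => simp [pvGA, pvBlocks_nil]
  | cons l t ih =>
    obtain ⟨ih1, ih2, ih3, ih4⟩ := ih
    by_cases hh : pvIsHeader l
    · -- header line: takeWhile stops, dropWhile keeps l, a new block starts at l
      have htw : (l :: t).takeWhile (fun l => !pvIsHeader l) = [] := by
        simp [hh]
      have hdw : (l :: t).dropWhile (fun l => !pvIsHeader l) = l :: t := by
        simp [hh]
      rw [htw, hdw]
      by_cases h1 : PySem.Str.strip l = "[api]"
      · rw [pvBlocks_api url t h1, pvGA_api url false t h1, pvGA_api url true t h1]
        simp [ih3]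
      · have hsw : PySem.Str.startswith (PySem.Str.strip l) "[" = true := hh
        rw [pvBlocks_other url t h1, pvGA_plain url t h1, pvGA_hdr url t h1 hsw]
        simp [ih1, ih2]
    · -- non-header line: preamble line / skipped body line
      have h1 : ¬ PySem.Str.strip l = "[api]" := fun h => hh (pvApi_isHeader h)
      have hsw : PySem.Str.startswith (PySem.Str.strip l) "[" = false := by
        simpa [pvIsHeader] using hh
      have htw : (l :: t).takeWhile (fun l => !pvIsHeader l) = l :: t.takeWhile (fun l => !pvIsHeader l) := by
        simp [hh]
      have hdw : (l :: t).dropWhile (fun l => !pvIsHeader l) = t.dropWhile (fun l => !pvIsHeader l) := by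
        simp [hh]
      rw [htw, hdw, pvGA_plain url t h1, pvGA_skip url t hsw]
      simp [ih1, ih2, ih3, ih4]

-- ===== VERDICT (by name: the statement is the Claim_ definition above) =====
theorem build_toml_content_py_spec : Claim_equal_build_toml_content_py := by
  intro url ls _
  obtain ⟨h1, h2, _, _⟩ := pvGA_eq_blocks url ls
  show _ = _
  unfold build_toml_content_py build_toml_content_py_alt
  simp only [pvFoldl_eq_gA, List.nil_append, Bool.false_or, h1, h2]
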